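-- pv_equiv track=rewrite | github.com/Vagacoder/Codesignal | python/Arcade/Core/C83Cipher26.py | cipher26
-- ===== SOURCE A (Python) =====
-- def cipher26(message:str) -> str:
--     alphabet = 'abcdefghijklmnopqrstuvwxyz'
--     n = len(message)
--     m = len(alphabet)
--     result = message[0]
--
--     for i in range(1, n):
--         curSum = 0
--         for j in range(i):
--             curSum += alphabet.index(result[j])
--
--         curM = alphabet.index(message[i])
--         while curM < curSum:
--             curM += m
--         result += alphabet[curM-curSum]
--
--     return result
-- ===== SOURCE B (Python) =====
-- def cipher26(message: str) -> str:
--     # one pass: keep the running prefix sum of deciphered letters modulo 26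
--     out = [message[0]]
--     s = ord(message[0]) - 97
--     for c in message[1:]:
--         d = (ord(c) - 97 - s) % 26
--         out.append(chr(d + 97))
--         s = (s + d) % 26
--     return ''.join(out)
-- ===== Notes on version B (the rewrite author's own statement) =====
-- stated objective: faster
-- what changed: B replaces A's quadratic recomputation of the prefix sum (and its index/while-loop normalisation) with a single pass that maintains the running prefix sum modulo 26 and uses ord/chr arithmetic.
import Mathlib
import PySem

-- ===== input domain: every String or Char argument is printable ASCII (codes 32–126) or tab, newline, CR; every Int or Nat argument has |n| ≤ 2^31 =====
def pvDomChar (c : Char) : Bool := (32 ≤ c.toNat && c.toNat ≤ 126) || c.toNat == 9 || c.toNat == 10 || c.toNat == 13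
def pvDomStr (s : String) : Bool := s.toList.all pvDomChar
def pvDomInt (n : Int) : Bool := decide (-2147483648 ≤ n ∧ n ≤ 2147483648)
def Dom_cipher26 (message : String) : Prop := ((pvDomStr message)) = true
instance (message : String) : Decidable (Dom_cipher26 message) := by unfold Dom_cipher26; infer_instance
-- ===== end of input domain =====

-- B replaces A's quadratic recomputation of the prefix sum with a single pass
-- keeping the running prefix sum modulo 26 (objective: faster, O(n^2) -> O(n)).


-- ===== PORT A =====
def pvAlphabet : List Char := "abcdefghijklmnopqrstuvwxyz".toList

-- alphabet.index(c); ValueError (none) is excluded by Pre_, so .getD 0 is never taken there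
def pvIdx (c : Char) : Int := ((PySem.List.index? pvAlphabet c).getD 0 : Nat)

-- the 'while curM < curSum: curM += m' loop of A
def pvBump (curM curSum : Int) : Int :=
  if curM < curSum then pvBump (curM + 26) curSum else curM
termination_by (curSum - curM).toNat
decreasing_by omega

-- the body of A's 'for i in range(1, n)' loop
def pvStepA (ms result : List Char) (i : Int) : List Char :=
  let curSum : Int := (PySem.List.pyRange 0 i 1).foldl
    (fun acc j => acc + pvIdx (PySem.List.pyGetD result j ' ')) 0
  let curM : Int := pvIdx ((PySem.List.pyGet? ms i).getD ' ')
  result ++ [PySem.List.pyGetD pvAlphabet (pvBump curM curSum - curSum) ' ']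

def cipher26 (message : String) : String :=
  let ms := message.toList
  let n : Int := ms.length
  -- message[0]; IndexError on the empty string is excluded by Pre_
  let result : List Char := [(PySem.List.pyGet? ms 0).getD ' ']
  String.ofList ((PySem.List.pyRange 1 n 1).foldl (pvStepA ms) result)

-- ===== PORT B =====
-- the body of B's single loop: state = (out, running prefix sum s mod 26)
def pvStepB (st : List Char × Int) (c : Char) : List Char × Int :=
  let d := PySem.Int.mod ((c.toNat : Int) - 97 - st.2) 26
  (st.1 ++ [Char.ofNat (d + 97).toNat], PySem.Int.mod (st.2 + d) 26)

def cipher26_alt (message : String) : String :=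
  match message.toList with
  | [] => String.ofList []   -- Source B raises IndexError here (empty input); excluded by Pre_
  | c0 :: rest => String.ofList (rest.foldl pvStepB ([c0], (c0.toNat : Int) - 97)).1

-- ===== PRECONDITION & SPEC =====
-- A raises IndexError on the empty string and ValueError (alphabet.index) on any non-lowercase-letter character;
-- Pre_ admits exactly the inputs on which A returns: nonempty, all-lowercase-letter strings.
def Pre_cipher26 (message : String) : Prop :=
  message.toList ≠ [] ∧ message.toList.all (fun c => 97 ≤ c.toNat && c.toNat ≤ 122) = true
instance (message : String) : Decidable (Pre_cipher26 message) := by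
  unfold Pre_cipher26; infer_instance

def pvWitness_cipher26 : String := "hello"

def Spec_cipher26 (message : String) (out : String) : Prop := out = cipher26_alt message
instance (message : String) (out : String) : Decidable (Spec_cipher26 message out) := by
  unfold Spec_cipher26; infer_instance

-- ===== CLAIM (what is proved, stated in full; the proofs are below) =====
def Claim_equal_cipher26 : Prop :=
  ∀ (message : String), Dom_cipher26 message → Pre_cipher26 message →
    Spec_cipher26 message (cipher26 message)

-- ===== LEMMAS AND PROOFS =====
lemma pvStepA_eq (ms result : List Char) (i : Int) :
    pvStepA ms result i =
      result ++ [PySem.List.pyGetD pvAlphabet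
        (pvBump (pvIdx ((PySem.List.pyGet? ms i).getD ' '))
            ((PySem.List.pyRange 0 i 1).foldl
              (fun acc j => acc + pvIdx (PySem.List.pyGetD result j ' ')) 0)
          - (PySem.List.pyRange 0 i 1).foldl
              (fun acc j => acc + pvIdx (PySem.List.pyGetD result j ' ')) 0) ' '] := rfl

lemma pvStepB_eq (st : List Char × Int) (c : Char) :
    pvStepB st c =
      (st.1 ++ [Char.ofNat ((PySem.Int.mod ((c.toNat : Int) - 97 - st.2) 26) + 97).toNat],
       PySem.Int.mod (st.2 + PySem.Int.mod ((c.toNat : Int) - 97 - st.2) 26) 26) := rfl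

lemma cipher26_eq (message : String) :
    cipher26 message = String.ofList ((PySem.List.pyRange 1 (message.toList.length : Int) 1).foldl
      (pvStepA message.toList) [(PySem.List.pyGet? message.toList 0).getD ' ']) := rfl

lemma cipher26_alt_cons (c0 : Char) (rest : List Char) (message : String)
    (h : message.toList = c0 :: rest) :
    cipher26_alt message = String.ofList (rest.foldl pvStepB ([c0], (c0.toNat : Int) - 97)).1 := by
  unfold cipher26_alt
  rw [h]

lemma pvBump_spec (m s : Int) (h : m < s + 26) :
    s ≤ pvBump m s ∧ pvBump m s < s + 26 ∧ pvBump m s % 26 = m % 26 := by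
  by_cases hm : m < s
  · have ih := pvBump_spec (m + 26) s (by omega)
    rw [pvBump, if_pos hm]
    omega
  · rw [pvBump, if_neg hm]
    omega
termination_by (s - m).toNat
decreasing_by omega

lemma pvIdx_lower (c : Char) (h1 : 97 ≤ c.toNat) (h2 : c.toNat ≤ 122) :
    pvIdx c = (c.toNat : Int) - 97 := by
  have hc := (Char.ofNat_toNat c).symm
  generalize hg : c.toNat = n at *
  subst hc
  interval_cases n <;> decide

lemma pvAlpha_get (k : Int) (h1 : 0 ≤ k) (h2 : k < 26) :
    PySem.List.pyGetD pvAlphabet k ' ' = Char.ofNat (k.toNat + 97) := by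
  have hk0 : k = (k.toNat : Int) := by omega
  rw [hk0]
  have hk : k.toNat < 26 := by omega
  generalize k.toNat = n at hk ⊢
  interval_cases n <;> decide

lemma pvOfNat_toNat (m : Nat) (hm : m < 26) : (Char.ofNat (m + 97)).toNat = m + 97 := by
  interval_cases m <;> decide

lemma pvIdx_nonneg (c : Char) : 0 ≤ pvIdx c := by
  simp [pvIdx]

lemma pvSum_nonneg (l : List Char) : 0 ≤ (l.map pvIdx).sum :=
  List.sum_nonneg (by intro x hx; obtain ⟨c, _, rfl⟩ := List.mem_map.1 hx; exact pvIdx_nonneg c)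

lemma pvMain (rest : List Char) : ∀ (pre result : List Char) (s : Int),
    result.length = pre.length →
    (∀ c ∈ result, 97 ≤ c.toNat ∧ c.toNat ≤ 122) →
    (∀ c ∈ rest, 97 ≤ c.toNat ∧ c.toNat ≤ 122) →
    0 ≤ s → s % 26 = (result.map pvIdx).sum % 26 →
    (PySem.List.pyRange (pre.length : Int) (((pre.length + rest.length : Nat) : Int)) 1).foldl
        (pvStepA (pre ++ rest)) result
      = (rest.foldl pvStepB (result, s)).1 := by
  induction rest with
  | nil =>
    intro pre result s h1 _ _ _ _
    rw [PySem.List.pyRange_one_eq_nil (by simp)]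
    simp
  | cons c rest ih =>
    intro pre result s h1 hres hrest hs0 hs
    rw [PySem.List.pyRange_one_cons (by simp only [List.length_cons]; push_cast; omega)]
    rw [List.foldl_cons, List.foldl_cons, pvStepA_eq, pvStepB_eq]
    have hc := hrest c (List.mem_cons_self)
    set S : Int := (result.map pvIdx).sum with hS
    have hSnn : 0 ≤ S := pvSum_nonneg result
    have hcurSum : (PySem.List.pyRange 0 (pre.length : Int) 1).foldl
        (fun acc j => acc + pvIdx (PySem.List.pyGetD result j ' ')) 0 = S := by
      rw [← h1]
      rw [PySem.List.foldl_pyRange_zero_pyGetD' result ' ' (fun acc c => acc + pvIdx c) 0]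
      rw [PySem.List.foldl_add]
      simp [hS]
    rw [hcurSum, PySem.List.pyGet?_append_length, Option.getD_some]
    have hb := pvBump_spec (pvIdx c) S (by rw [pvIdx_lower c hc.1 hc.2]; omega)
    set k : Int := (pvIdx c - S) % 26 with hk
    have hk0 : 0 ≤ k := Int.emod_nonneg _ (by omega)
    have hk26 : k < 26 := Int.emod_lt_of_pos _ (by omega)
    have hkeq : pvBump (pvIdx c) S - S = k := by omega
    rw [hkeq, pvAlpha_get k hk0 hk26]
    have hd : PySem.Int.mod ((c.toNat : Int) - 97 - s) 26 = k := by
      rw [PySem.Int.mod_eq_emod_of_pos (show (0:Int) < 26 by omega),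
        pvIdx_lower c hc.1 hc.2] at *
      omega
    rw [hd]
    have hcast : (k + 97).toNat = k.toNat + 97 := by omega
    rw [hcast]
    have hknat : k.toNat < 26 := by omega
    have hchar : (Char.ofNat (k.toNat + 97)).toNat = k.toNat + 97 := pvOfNat_toNat _ hknat
    have hassoc : pre ++ c :: rest = (pre ++ [c]) ++ rest := by simp
    have hlen : ((pre.length : Int) + 1) = ((pre ++ [c]).length : Int) := by
      simp
    have hbound : (((pre.length + (c :: rest).length : Nat)) : Int)
        = (((pre ++ [c]).length + rest.length : Nat) : Int) := by
      simp; omega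
    rw [hassoc, hlen, hbound]
    apply ih
    · simp [h1]
    · intro x hx
      rcases List.mem_append.1 hx with hx | hx
      · exact hres x hx
      · simp only [List.mem_singleton] at hx
        subst hx
        rw [hchar]; omega
    · intro x hx; exact hrest x (List.mem_cons_of_mem _ hx)
    · exact PySem.Int.mod_nonneg _ (by omega)
    · have hpvch : pvIdx (Char.ofNat (k.toNat + 97)) = k := by
        rw [pvIdx_lower _ (by omega) (by omega), hchar]
        omega
      rw [List.map_append, List.sum_append, List.map_singleton, List.sum_singleton, hpvch,
        PySem.Int.mod_eq_emod_of_pos (show (0:Int) < 26 by omega)]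
      omega

-- ===== VERDICT (by name: the statement is the Claim_ definition above) =====
theorem cipher26_spec : Claim_equal_cipher26 := by
  intro message _ hpre
  obtain ⟨hne, hlow⟩ := hpre
  unfold Spec_cipher26
  rcases hms : message.toList with _ | ⟨c0, rest⟩
  · exact absurd hms hne
  · rw [hms] at hlow
    simp only [List.all_eq_true, Bool.and_eq_true, decide_eq_true_eq] at hlow
    have hc0 := hlow c0 (List.mem_cons_self)
    rw [cipher26_eq, cipher26_alt_cons c0 rest message hms, hms,
      PySem.List.pyGet?_zero_cons, Option.getD_some]
    have hmain := pvMain rest [c0] [c0] ((c0.toNat : Int) - 97)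
      rfl
      (by intro x hx; simp only [List.mem_singleton] at hx; subst hx; exact hc0)
      (by intro x hx; exact hlow x (List.mem_cons_of_mem _ hx))
      (by omega)
      (by rw [List.map_singleton, List.sum_singleton, pvIdx_lower c0 hc0.1 hc0.2])
    simp only [List.singleton_append, List.length_singleton, Nat.cast_one] at hmain
    have hbound : (((c0 :: rest).length : Nat) : Int) = ((1 + rest.length : Nat) : Int) := by
      simp; omega
    rw [hbound]
    exact congrArg String.ofList hmain
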